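-- pv_equiv track=rewrite | github.com/SomethingOnline/dcu | ca117/revision/AllWeeks/week3/3.2/wordcomps_032.py | ShortestAllVowels
-- ===== SOURCE A (Python) =====
-- def ShortestAllVowels(list):
--     vowels = ['a', 'e', 'i', 'o', 'u']
--     allvowels = []
--     for line in list:
--         line = line.strip()
--         if line.count('a') >= 1 and line.count('e') >= 1 and line.count('i') >= 1 and line.count('o') >= 1 and line.count('u') >= 1:
--             allvowels.append(line)
--     return min(allvowels, key=len)
-- ===== SOURCE B (Python) =====
-- def ShortestAllVowels(list):
--     words = [line.strip() for line in list]
--     qualifying = [w for w in words if set('aeiou') <= set(w)]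
--     qualifying.sort(key=len)
--     return qualifying[0]
-- ===== Notes on version B (the rewrite author's own statement) =====
-- stated objective: alternative
-- what changed: B is a staged pipeline: strip every line, filter with a set-subset test (set('aeiou') <= set(w)) instead of five count() calls, stably sort the qualifiers by length and return the first element, instead of A's single filtering loop followed by min(key=len).
import Mathlib
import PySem

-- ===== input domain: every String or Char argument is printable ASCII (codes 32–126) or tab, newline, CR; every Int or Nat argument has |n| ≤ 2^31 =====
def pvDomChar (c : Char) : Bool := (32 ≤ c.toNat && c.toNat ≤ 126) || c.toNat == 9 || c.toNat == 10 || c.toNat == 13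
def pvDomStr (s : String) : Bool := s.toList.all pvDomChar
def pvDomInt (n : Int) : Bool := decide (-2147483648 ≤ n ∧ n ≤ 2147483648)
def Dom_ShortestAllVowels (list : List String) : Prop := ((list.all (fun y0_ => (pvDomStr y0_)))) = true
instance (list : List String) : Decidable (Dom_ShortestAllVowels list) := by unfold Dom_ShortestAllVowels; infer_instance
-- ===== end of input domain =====

-- B replaces A's single filter-loop + min(key=len) by a staged pipeline: strip-map,
-- set-subset vowel filter, stable sort by length, take the first element (alternative).
-- Both Pythons raise when no line qualifies (A ValueError, B IndexError); Pre_ excludes exactly those inputs.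


-- ===== PORT A =====
def ShortestAllVowels (list : List String) : String :=
  -- vowels = ['a','e','i','o','u'] is defined in A but never read; the loop tests counts directly
  let allvowels := list.foldl (fun acc line =>
    let line := PySem.Str.strip line
    if PySem.Str.count line "a" ≥ 1 ∧ PySem.Str.count line "e" ≥ 1 ∧ PySem.Str.count line "i" ≥ 1 ∧
       PySem.Str.count line "o" ≥ 1 ∧ PySem.Str.count line "u" ≥ 1
    then acc ++ [line] else acc) []
  match PySem.List.min? allvowels (fun s => PySem.Str.len s) with
  | some m => m
  | none => ""   -- Python: min([]) raises ValueError; excluded by Pre_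

-- ===== PORT B =====
def ShortestAllVowels_alt (list : List String) : String :=
  let words := list.map PySem.Str.strip
  let qualifying := words.filter (fun w =>
    PySem.Set.issubset (PySem.Set.ofList "aeiou".toList) (PySem.Set.ofList w.toList))
  match PySem.List.sorted qualifying (fun s => PySem.Str.len s) with
  | m :: _ => m
  | [] => ""   -- Python: qualifying[0] raises IndexError; excluded by Pre_

-- ===== PRECONDITION & SPEC =====
-- Pre_ excludes exactly the inputs where A raises ValueError (min of an empty sequence):
-- lists with no line whose strip contains all five vowels.
def Pre_ShortestAllVowels (list : List String) : Prop :=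
  (list.any fun line =>
    PySem.Set.issubset (PySem.Set.ofList "aeiou".toList)
      (PySem.Set.ofList (PySem.Str.strip line).toList)) = true
instance (list : List String) : Decidable (Pre_ShortestAllVowels list) := by
  unfold Pre_ShortestAllVowels; infer_instance
def pvWitness_ShortestAllVowels : List String := ["sequoia"]
def Spec_ShortestAllVowels (list : List String) (out : String) : Prop := out = ShortestAllVowels_alt list
instance (list : List String) (out : String) : Decidable (Spec_ShortestAllVowels list out) := by unfold Spec_ShortestAllVowels; infer_instance

-- ===== CLAIM (what is proved, stated in full; the proofs are below) =====
def Claim_equal_ShortestAllVowels : Prop := ∀ (list : List String), Dom_ShortestAllVowels list → Pre_ShortestAllVowels list → Spec_ShortestAllVowels list (ShortestAllVowels list)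

-- ===== LEMMAS AND PROOFS =====

-- Counting a single-character needle is counting that character
theorem countgo_single (c : Char) : ∀ (s : List Char) (fuel acc : Nat), s.length ≤ fuel →
    PySem.Chars.count.go [c] fuel s acc = acc + s.count c := by
  intro s
  induction s with
  | nil => intro fuel acc _; cases fuel <;> simp [PySem.Chars.count.go]
  | cons h t ih =>
    intro fuel acc hf
    cases fuel with
    | zero => simp at hf
    | succ f =>
      simp only [List.length_cons, Nat.succ_le_succ_iff] at hf
      simp only [PySem.Chars.count.go, List.isPrefixOf]
      by_cases hc : c = h
      · subst hc
        simp only [beq_self_eq_true, Bool.and_self, if_true, List.length_cons,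
          List.length_nil, List.drop_succ_cons, List.drop_zero]
        rw [ih f (acc + 1) hf, List.count_cons]
        simp; omega
      · have hb : (c == h) = false := by simp [hc]
        simp only [hb, Bool.false_and]
        rw [ih f acc hf, List.count_cons]
        simp [Ne.symm hc]

theorem count_ge_one_iff (c : Char) (s : List Char) :
    1 ≤ PySem.Chars.count s [c] ↔ c ∈ s := by
  have h := countgo_single c s s.length 0 le_rfl
  simp [PySem.Chars.count, List.isEmpty, h]

-- A's five count tests and B's set-subset test agree on every word
theorem test_eq (w : String) :
    (decide (PySem.Str.count w "a" ≥ 1 ∧ PySem.Str.count w "e" ≥ 1 ∧ PySem.Str.count w "i" ≥ 1 ∧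
       PySem.Str.count w "o" ≥ 1 ∧ PySem.Str.count w "u" ≥ 1)) =
    PySem.Set.issubset (PySem.Set.ofList "aeiou".toList) (PySem.Set.ofList w.toList) := by
  rw [Bool.eq_iff_iff]
  rw [show PySem.Set.ofList "aeiou".toList = ['a', 'e', 'i', 'o', 'u'] from rfl]
  simp only [decide_eq_true_eq, PySem.Set.issubset_iff, PySem.Set.mem_ofList, PySem.Str.count]
  rw [show "a".toList = ['a'] from rfl, show "e".toList = ['e'] from rfl,
      show "i".toList = ['i'] from rfl, show "o".toList = ['o'] from rfl,
      show "u".toList = ['u'] from rfl]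
  simp only [ge_iff_le, count_ge_one_iff, List.mem_cons, List.not_mem_nil, or_false,
    forall_eq_or_imp, forall_eq]

-- head of PySem's stable insertion sort is the running first-minimum
theorem head?_insertBy {α : Type} (key : α → Int) (x : α) (ys : List α) :
    (PySem.List.insertBy (fun a b => decide (key a < key b)) x ys).head? =
    (match ys.head? with
     | none => some x
     | some m => if key x < key m then some x else some m) := by
  cases ys with
  | nil => rfl
  | cons y t =>
    simp only [PySem.List.insertBy, List.head?]
    by_cases h : key x < key y
    · simp [h]
    · simp [h]

theorem head?_foldl_insertBy {α : Type} (key : α → Int) (xs : List α) : ∀ (acc : List α),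
    (xs.foldl (fun acc x => PySem.List.insertBy (fun a b => decide (key a < key b)) x acc) acc).head? =
    xs.foldl (fun o x =>
      match o with
      | none => some x
      | some m => if key x < key m then some x else some m) acc.head? := by
  induction xs with
  | nil => intro acc; rfl
  | cons x t ih =>
    intro acc
    simp only [List.foldl_cons]
    rw [ih, head?_insertBy]

theorem head?_sorted_eq_min? {α : Type} (xs : List α) (key : α → Int) :
    (PySem.List.sorted xs key false).head? = PySem.List.min? xs key := by
  rw [PySem.List.sorted_eq_foldl_insertBy, head?_foldl_insertBy]
  simp only [List.head?]
  rfl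

-- (l.filter (q ∘ strip)).map strip = (l.map strip).filter q, citing List.filter_map
theorem filter_strip (q : String → Bool) (l : List String) :
    (l.filter (fun line => q (PySem.Str.strip line))).map PySem.Str.strip =
    (l.map PySem.Str.strip).filter q := by
  simpa [Function.comp] using
    (List.filter_map (f := PySem.Str.strip) (p := q) (l := l)).symm

-- the whole equivalence, with the vowel test abstracted to keep terms small
theorem pipeline_eq (q : String → Bool) (l : List String) :
    (match PySem.List.min?
        (l.foldl (fun acc line =>
          if q (PySem.Str.strip line) = true then acc ++ [PySem.Str.strip line] else acc) [])
        (fun s => PySem.Str.len s) with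
     | some m => m
     | none => "") =
    (match PySem.List.sorted ((l.map PySem.Str.strip).filter q) (fun s => PySem.Str.len s) with
     | m :: _ => m
     | [] => "") := by
  rw [PySem.List.foldl_append_if (p := fun line => q (PySem.Str.strip line))
        (f := PySem.Str.strip), List.nil_append, filter_strip, ← head?_sorted_eq_min?]
  cases PySem.List.sorted ((l.map PySem.Str.strip).filter q) (fun s => PySem.Str.len s) false with
  | nil => rfl
  | cons m t => rfl

-- ===== VERDICT (by name: the statement is the Claim_ definition above) =====
set_option maxHeartbeats 1000000 in
theorem ShortestAllVowels_spec : Claim_equal_ShortestAllVowels := by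
  intro list _ _
  unfold Spec_ShortestAllVowels
  simp only [ShortestAllVowels, ShortestAllVowels_alt]
  have hfun : (fun (acc : List String) line =>
      let line := PySem.Str.strip line
      if PySem.Str.count line "a" ≥ 1 ∧ PySem.Str.count line "e" ≥ 1 ∧ PySem.Str.count line "i" ≥ 1 ∧
         PySem.Str.count line "o" ≥ 1 ∧ PySem.Str.count line "u" ≥ 1
      then acc ++ [line] else acc) =
    (fun (acc : List String) line =>
      if (PySem.Set.issubset (PySem.Set.ofList "aeiou".toList)
            (PySem.Set.ofList (PySem.Str.strip line).toList)) = true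
      then acc ++ [PySem.Str.strip line] else acc) := by
    funext acc line
    by_cases h : PySem.Str.count (PySem.Str.strip line) "a" ≥ 1 ∧
        PySem.Str.count (PySem.Str.strip line) "e" ≥ 1 ∧ PySem.Str.count (PySem.Str.strip line) "i" ≥ 1 ∧
        PySem.Str.count (PySem.Str.strip line) "o" ≥ 1 ∧ PySem.Str.count (PySem.Str.strip line) "u" ≥ 1
    · have hq := (test_eq (PySem.Str.strip line)).symm.trans (decide_eq_true h)
      rw [if_pos h, if_pos hq]
    · have hq := (test_eq (PySem.Str.strip line)).symm.trans (decide_eq_false h)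
      exact (if_neg h).trans (if_neg (fun hc => absurd (hq ▸ hc) Bool.false_ne_true)).symm
  rw [hfun]
  exact pipeline_eq (fun w => PySem.Set.issubset (PySem.Set.ofList "aeiou".toList)
    (PySem.Set.ofList w.toList)) list
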